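-- pv_equiv track=rewrite | github.com/thureinphyoecoder/dear-career2 | backend/jobs/services/ingest_persist.py | _extract_readable_markdown_body
-- ===== SOURCE A (Python) =====
-- def _extract_readable_markdown_body(payload: str) -> str:
--     marker = "Markdown Content:"
--     body = payload.split(marker, 1)[1] if marker in payload else payload
--     body = body.replace("\r\n", "\n").strip()
--     if not body:
--         return ""
--
--     lines = [line.rstrip() for line in body.split("\n")]
--     cleaned_lines: list[str] = []
--     previous_blank = False
--
--     for line in lines:
--         stripped = line.strip()
--         if not stripped:
--             if cleaned_lines and not previous_blank:
--                 cleaned_lines.append("")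
--             previous_blank = True
--             continue
--         if stripped.startswith(("Title:", "URL Source:")):
--             continue
--         cleaned_lines.append(stripped)
--         previous_blank = False
--
--     return "\n".join(cleaned_lines).strip()
-- ===== SOURCE B (Python) =====
-- def _extract_readable_markdown_body(payload: str) -> str:
--     marker = "Markdown Content:"
--     body = payload.split(marker, 1)[1] if marker in payload else payload
--     body = body.replace("\r\n", "\n").strip()
--     # stage 1: strip every line, drop Title:/URL Source: lines (blanks stay)
--     kept = [s for s in (ln.strip() for ln in body.split("\n"))
--             if not s.startswith(("Title:", "URL Source:"))]
--     # stage 2: collapse each maximal run of blank lines to a single blank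
--     parts = []
--     i, n = 0, len(kept)
--     while i < n:
--         blank = kept[i] == ""
--         j = i
--         while j < n and (kept[j] == "") == blank:
--             j += 1
--         if blank:
--             parts.append("")
--         else:
--             parts.extend(kept[i:j])
--         i = j
--     return "\n".join(parts).strip()
-- ===== Notes on version B (the rewrite author's own statement) =====
-- stated objective: alternative
-- what changed: A's single stateful pass (previous_blank flag interleaved with skip branches) is re-decomposed into two stages: first strip every line and filter out Title:/URL Source: lines, then collapse each maximal run of blank lines with a span-scanning loop; join and strip as before.
import Mathlib
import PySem

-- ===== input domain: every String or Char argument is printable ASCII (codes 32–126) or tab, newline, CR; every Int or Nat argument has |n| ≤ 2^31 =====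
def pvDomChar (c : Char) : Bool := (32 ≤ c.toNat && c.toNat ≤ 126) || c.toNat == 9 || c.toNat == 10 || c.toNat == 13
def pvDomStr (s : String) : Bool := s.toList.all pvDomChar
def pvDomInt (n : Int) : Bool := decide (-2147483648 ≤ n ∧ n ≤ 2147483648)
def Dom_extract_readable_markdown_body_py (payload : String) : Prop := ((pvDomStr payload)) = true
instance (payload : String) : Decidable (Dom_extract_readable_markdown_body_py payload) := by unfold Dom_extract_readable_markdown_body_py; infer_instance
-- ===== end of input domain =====

-- B re-decomposes A's single stateful pass as filter-lines-then-collapse-blank-runs (two stages); same return value, no speed claim.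

-- shared prefix of both Pythons (identical lines of code in Source A and Source B): marker split, CRLF normalisation, outer strip
def pvBody (payload : String) : String :=
  let marker := "Markdown Content:"
  let body := if PySem.Str.isIn marker payload then
      (PySem.List.pyGet? ((PySem.Str.splitMax? payload marker 1).getD []) 1).getD ""
    else payload
  PySem.Str.strip (PySem.Str.replace body "\r\n" "\n")

-- ===== PORT A =====
def pvStepA (st : List String × Bool) (line : String) : List String × Bool :=
  let stripped := PySem.Str.strip line
  if stripped = "" then
    (if st.1 ≠ [] ∧ st.2 = false then st.1 ++ [""] else st.1, true)
  else if PySem.Str.startswith stripped "Title:" || PySem.Str.startswith stripped "URL Source:" then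
    st
  else (st.1 ++ [stripped], false)

def extract_readable_markdown_body_py (payload : String) : String :=
  let body := pvBody payload
  if body = "" then ""
  else
    let lines := ((PySem.Str.split? body "\n").getD []).map PySem.Str.rstrip
    let res := lines.foldl pvStepA ([], false)
    PySem.Str.strip (PySem.Str.join "\n" res.1)

-- ===== PORT B =====
def pvP (s : String) : Bool :=
  !(PySem.Str.startswith s "Title:" || PySem.Str.startswith s "URL Source:")

-- maximal-run collapsing (the index/span loop of Source B): each run of blanks becomes one "", nonblank runs are kept
def pvRunsCollapse : List String → List String
  | [] => []
  | t :: ts =>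
    (if decide (t = "") then [""] else t :: ts.takeWhile (fun s => decide (s = "") == decide (t = ""))) ++
      pvRunsCollapse (ts.dropWhile (fun s => decide (s = "") == decide (t = "")))
  termination_by ts => ts.length
  decreasing_by
    have := (List.dropWhile_sublist (l := ts) (p := fun s => decide (s = "") == decide (t = ""))).length_le
    simp only [List.length_cons]; omega

def extract_readable_markdown_body_py_alt (payload : String) : String :=
  let body := pvBody payload
  let kept := (((PySem.Str.split? body "\n").getD []).map PySem.Str.strip).filter pvP
  PySem.Str.strip (PySem.Str.join "\n" (pvRunsCollapse kept))

-- ===== PRECONDITION & SPEC =====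
def Spec_extract_readable_markdown_body_py (payload : String) (out : String) : Prop := out = extract_readable_markdown_body_py_alt payload
instance (payload : String) (out : String) : Decidable (Spec_extract_readable_markdown_body_py payload out) := by unfold Spec_extract_readable_markdown_body_py; infer_instance

-- ===== CLAIM (what is proved, stated in full; the proofs are below) =====
def Claim_equal_extract_readable_markdown_body_py : Prop := ∀ (payload : String), Dom_extract_readable_markdown_body_py payload → Spec_extract_readable_markdown_body_py payload (extract_readable_markdown_body_py payload)

-- ===== LEMMAS AND PROOFS =====

-- canonical blank-collapsing recursion both loops are reduced to
def pvC : Bool → List String → List String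
  | _, [] => []
  | prev, t :: ts =>
    if t = "" then (if prev then pvC true ts else "" :: pvC true ts) else t :: pvC false ts

-- A's loop, with the skip branch already filtered away; ne = "cleaned_lines is nonempty"
def pvRun : Bool → Bool → List String → List String
  | _, _, [] => []
  | ne, prev, t :: ts =>
    if t = "" then (if ne ∧ prev = false then "" :: pvRun ne true ts else pvRun ne true ts)
    else t :: pvRun true false ts

theorem pv_rstrip_cons (c : Char) (cs : List Char) :
    PySem.Chars.rstrip (c :: cs)
      = if PySem.Chars.rstrip cs = [] then (if PySem.Chars.isspace c then [] else [c])
        else c :: PySem.Chars.rstrip cs := by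
  unfold PySem.Chars.rstrip
  rw [List.reverse_cons, List.dropWhile_append]
  by_cases h : (List.dropWhile PySem.Chars.isspace cs.reverse) = []
  · rw [if_pos (by simp [h]), if_pos (by simp [h])]
    by_cases hc : PySem.Chars.isspace c <;> simp [List.dropWhile, hc]
  · rw [if_neg (by simpa using h), if_neg (by simp [h])]
    simp

theorem pv_rstrip_nil_iff (cs : List Char) :
    PySem.Chars.rstrip cs = [] ↔ PySem.Chars.lstrip cs = [] := by
  unfold PySem.Chars.rstrip PySem.Chars.lstrip
  rw [List.reverse_eq_nil_iff, List.dropWhile_eq_nil_iff, List.dropWhile_eq_nil_iff]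
  simp

theorem pv_rstrip_idem (cs : List Char) :
    PySem.Chars.rstrip (PySem.Chars.rstrip cs) = PySem.Chars.rstrip cs := by
  unfold PySem.Chars.rstrip
  rw [List.reverse_reverse, List.dropWhile_idempotent]

theorem pv_strip_rstrip_chars (cs : List Char) :
    PySem.Chars.strip (PySem.Chars.rstrip cs) = PySem.Chars.strip cs := by
  induction cs with
  | nil => rfl
  | cons c cs ih =>
    unfold PySem.Chars.strip PySem.Chars.lstrip at *
    rw [pv_rstrip_cons]
    by_cases hc : PySem.Chars.isspace c
    · by_cases h0 : PySem.Chars.rstrip cs = []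
      · rw [if_pos h0, if_pos hc]
        have hl : List.dropWhile PySem.Chars.isspace cs = [] := (pv_rstrip_nil_iff cs).mp h0
        rw [List.dropWhile_cons_of_pos hc, hl]
        rfl
      · rw [if_neg h0, List.dropWhile_cons_of_pos hc, List.dropWhile_cons_of_pos hc]
        exact ih
    · have hcons : PySem.Chars.rstrip (c :: cs) = c :: PySem.Chars.rstrip cs := by
        rw [pv_rstrip_cons]
        by_cases h0 : PySem.Chars.rstrip cs = [] <;> simp [h0, hc]
      rw [← pv_rstrip_cons, hcons, List.dropWhile_cons_of_neg hc, List.dropWhile_cons_of_neg hc]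
      rw [show PySem.Chars.rstrip (c :: PySem.Chars.rstrip cs)
            = if PySem.Chars.rstrip (PySem.Chars.rstrip cs) = [] then (if PySem.Chars.isspace c then [] else [c])
              else c :: PySem.Chars.rstrip (PySem.Chars.rstrip cs) from pv_rstrip_cons c _,
          pv_rstrip_idem, ← pv_rstrip_cons]

theorem pv_strip_rstrip (s : String) : PySem.Str.strip (PySem.Str.rstrip s) = PySem.Str.strip s := by
  apply String.toList_inj.mp
  rw [PySem.Str.toList_strip, PySem.Str.toList_strip, PySem.Str.toList_rstrip, pv_strip_rstrip_chars]

theorem pvRun_blank (ne prev : Bool) (rest : List String) :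
    pvRun ne prev ("" :: rest)
      = if ne = true ∧ prev = false then "" :: pvRun ne true rest else pvRun ne true rest := by
  simp [pvRun]

theorem pvRun_cons (t : String) (ht : ¬ t = "") (ne prev : Bool) (rest : List String) :
    pvRun ne prev (t :: rest) = t :: pvRun true false rest := by
  simp [pvRun, ht]

theorem pv_fold_run (lines : List String) (acc : List String) (prev : Bool) :
    (List.foldl pvStepA (acc, prev) lines).1
      = acc ++ pvRun (decide (acc ≠ [])) prev ((lines.map PySem.Str.strip).filter pvP) := by
  induction lines generalizing acc prev with
  | nil => simp [pvRun]
  | cons l ls ih =>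
    simp only [List.foldl_cons, List.map_cons, List.filter_cons]
    by_cases hs : PySem.Str.strip l = ""
    · rw [hs]
      have hp : pvP "" = true := by decide
      rw [hp, if_pos rfl]
      have hstep : pvStepA (acc, prev) l = (if acc ≠ [] ∧ prev = false then acc ++ [""] else acc, true) := by
        simp [pvStepA, hs]
      rw [hstep, pvRun_blank]
      by_cases hc : acc ≠ [] ∧ prev = false
      · rw [if_pos hc, ih]
        have hne2 : (decide (acc ++ [""] ≠ [])) = true := by simp
        have hne : (decide (acc ≠ [])) = true := by simp [hc.1]
        rw [hne2, hne, if_pos ⟨rfl, hc.2⟩]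
        simp [List.append_assoc]
      · rw [if_neg hc, ih]
        rw [if_neg]
        intro h
        exact hc ⟨by simpa using h.1, h.2⟩
    · cases hp : (PySem.Str.startswith (PySem.Str.strip l) "Title:" || PySem.Str.startswith (PySem.Str.strip l) "URL Source:") with
      | true =>
        have hpf : pvP (PySem.Str.strip l) = false := by simp only [pvP, hp, Bool.not_true]
        rw [hpf]
        simp only [Bool.false_eq_true, if_false]
        have hstep : pvStepA (acc, prev) l = (acc, prev) := by
          simp only [pvStepA, if_neg hs, hp, if_true]
        rw [hstep, ih]
      | false =>
        have hpt : pvP (PySem.Str.strip l) = true := by simp only [pvP, hp, Bool.not_false]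
        rw [hpt, if_pos rfl]
        have hstep : pvStepA (acc, prev) l = (acc ++ [PySem.Str.strip l], false) := by
          simp only [pvStepA, if_neg hs, hp, Bool.false_eq_true, if_false]
        rw [hstep, ih, pvRun_cons _ hs]
        have hne2 : (decide (acc ++ [PySem.Str.strip l] ≠ [])) = true := by simp
        rw [hne2]
        simp [List.append_assoc]


theorem pv_run_true (ts : List String) (prev : Bool) : pvRun true prev ts = pvC prev ts := by
  induction ts generalizing prev with
  | nil => simp [pvRun, pvC]
  | cons t ts ih =>
    by_cases ht : t = "" <;> cases prev <;> simp [pvRun, pvC, ht, ih]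

theorem pv_run_false (ts : List String) (prev : Bool) :
    pvRun false prev ts = List.dropWhile (fun s => decide (s = "")) (pvC prev ts) := by
  induction ts generalizing prev with
  | nil => simp [pvRun, pvC]
  | cons t ts ih =>
    by_cases ht : t = ""
    · cases prev <;> simp [pvRun, pvC, ht, ih]
    · simp [pvRun, pvC, ht, pv_run_true]

theorem pv_c_true (ts : List String) :
    pvC true ts = pvC false (List.dropWhile (fun s => decide (s = "")) ts) := by
  induction ts with
  | nil => simp [pvC]
  | cons t ts ih =>
    by_cases ht : t = "" <;> simp [pvC, ht, ih]

theorem pv_c_append (g rest : List String) (h : ∀ s ∈ g, ¬ s = "") :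
    pvC false (g ++ rest) = g ++ pvC false rest := by
  induction g with
  | nil => simp
  | cons a g ih =>
    have ha : ¬ a = "" := h a (List.mem_cons_self ..)
    simp only [List.cons_append, pvC, if_neg ha]
    rw [ih (fun s hs => h s (List.mem_cons_of_mem _ hs))]

theorem pv_collapse_eq_c (ts : List String) : pvRunsCollapse ts = pvC false ts := by
  induction ts using pvRunsCollapse.induct with
  | case1 => simp [pvRunsCollapse, pvC]
  | case2 t ts ih =>
    rw [pvRunsCollapse]
    by_cases ht : t = ""
    · subst ht
      simp only [decide_true, beq_true] at ih ⊢
      rw [ih]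
      simp [pvC, pv_c_true]
    · have hd : decide (t = "") = false := by simp [ht]
      simp only [hd, beq_false] at ih ⊢
      rw [ih]
      simp only [Bool.false_eq_true, if_false, List.cons_append, pvC, if_neg ht]
      rw [← pv_c_append (List.takeWhile (fun s : String => !decide (s = "")) ts)
            (List.dropWhile (fun s : String => !decide (s = "")) ts)
            (fun s hs => by simpa using List.mem_takeWhile_imp hs),
          List.takeWhile_append_dropWhile]

theorem pv_strip_nl (cs : List Char) : PySem.Chars.strip ('\n' :: cs) = PySem.Chars.strip cs := by
  unfold PySem.Chars.strip PySem.Chars.lstrip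
  rw [List.dropWhile_cons_of_pos (by decide)]

theorem pv_join_blank (r : List String) :
    PySem.Str.strip (PySem.Str.join "\n" ("" :: r)) = PySem.Str.strip (PySem.Str.join "\n" r) := by
  apply String.toList_inj.mp
  simp only [PySem.Str.toList_strip, PySem.Str.toList_join, List.map_cons]
  cases r with
  | nil => rfl
  | cons q r' =>
    rw [List.map_cons, PySem.Chars.join_cons_cons]
    show PySem.Chars.strip ('\n' :: PySem.Chars.join "\n".toList (q.toList :: List.map String.toList r')) = _
    rw [pv_strip_nl]

theorem pv_strip_join_dropWhile (xs : List String) :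
    PySem.Str.strip (PySem.Str.join "\n" (List.dropWhile (fun s => decide (s = "")) xs))
      = PySem.Str.strip (PySem.Str.join "\n" xs) := by
  induction xs with
  | nil => rfl
  | cons t ts ih =>
    by_cases ht : t = ""
    · subst ht
      rw [List.dropWhile_cons_of_pos (by simp), ih, pv_join_blank]
    · rw [List.dropWhile_cons_of_neg (by simpa using ht)]

-- ===== VERDICT (by name: the statement is the Claim_ definition above) =====
theorem extract_readable_markdown_body_py_spec : Claim_equal_extract_readable_markdown_body_py := by
  intro payload _
  unfold Spec_extract_readable_markdown_body_py
  unfold extract_readable_markdown_body_py extract_readable_markdown_body_py_alt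
  by_cases h : pvBody payload = ""
  · simp only [h]
    rw [pv_collapse_eq_c]
    decide
  · simp only [if_neg h]
    rw [pv_fold_run]
    have hmap : (((PySem.Str.split? (pvBody payload) "\n").getD []).map PySem.Str.rstrip).map PySem.Str.strip
        = ((PySem.Str.split? (pvBody payload) "\n").getD []).map PySem.Str.strip := by
      rw [List.map_map]
      exact List.map_congr_left (fun s _ => pv_strip_rstrip s)
    rw [hmap]
    rw [show (decide (([] : List String) ≠ [])) = false by decide]
    rw [pv_run_false]; simp only [List.nil_append]
    rw [pv_strip_join_dropWhile, pv_collapse_eq_c]
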